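-- pv_equiv track=rewrite | github.com/opencobra/optlang | optlang/interface/trackers/base.py | _iter_last_unique
-- ===== SOURCE A (Python) =====
-- def _iter_last_unique(iterable):
--     seen = set()
--     for pack in reversed(iterable):
--         obj = pack[0]
--         if obj in seen:
--             continue
--         yield pack
--         seen.add(obj)
--     iterable.clear()
-- ===== SOURCE B (Python) =====
-- def _iter_last_unique(iterable):
--     last_index = {}
--     for i, pack in enumerate(iterable):
--         last_index[pack[0]] = i
--     for i in range(len(iterable) - 1, -1, -1):
--         pack = iterable[i]
--         if last_index[pack[0]] == i:
--             yield pack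
--     iterable.clear()
-- ===== Notes on version B (the rewrite author's own statement) =====
-- stated objective: alternative
-- what changed: Replaced the single reverse pass with a growing seen-set by a two-phase decomposition: a forward enumerate pass builds a last-occurrence index table, then a reverse index loop yields exactly the packs whose index equals their key's last occurrence.
import Mathlib
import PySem

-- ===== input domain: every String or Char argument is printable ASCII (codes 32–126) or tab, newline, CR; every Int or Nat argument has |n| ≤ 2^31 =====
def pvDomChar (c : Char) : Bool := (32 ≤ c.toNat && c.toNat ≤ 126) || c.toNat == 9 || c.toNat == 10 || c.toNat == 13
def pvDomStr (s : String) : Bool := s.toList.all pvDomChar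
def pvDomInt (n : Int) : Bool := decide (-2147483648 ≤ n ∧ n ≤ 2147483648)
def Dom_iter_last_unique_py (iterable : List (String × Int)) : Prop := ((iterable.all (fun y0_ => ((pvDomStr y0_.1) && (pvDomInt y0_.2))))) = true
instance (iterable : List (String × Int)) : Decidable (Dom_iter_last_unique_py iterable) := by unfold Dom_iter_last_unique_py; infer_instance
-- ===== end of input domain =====

-- B replaces A's single reverse pass with a growing seen-set by a two-phase decomposition (forward pass
-- building a last-occurrence index table, then a reverse filtering loop); equivalence is about the returned
-- sequence — both A and B consume the iterator fully and clear the argument list at the end.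


-- ===== PORT A =====
-- seen = set(); for pack in reversed(iterable): obj = pack[0]; if obj in seen: continue; yield pack; seen.add(obj)
def iter_last_unique_py (iterable : List (String × Int)) : List (String × Int) :=
  (iterable.reverse.foldl
    (fun (st : List (String × Int) × PySem.Set String) pack =>
      if st.2.contains pack.1 then st
      else (st.1 ++ [pack], PySem.Set.add st.2 pack.1))
    ([], PySem.Set.empty)).1

-- ===== PORT B =====
-- forward enumerate pass builds last_index; reverse index loop yields iterable[i] when last_index[pack[0]] == i
def iter_last_unique_py_alt (iterable : List (String × Int)) : List (String × Int) :=
  let lastIdx : PySem.Dict String Int :=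
    (PySem.List.enumerate iterable 0).foldl (fun d p => d.insert p.2.1 p.1) PySem.Dict.empty
  (PySem.List.pyRange ((iterable.length : Int) - 1) (-1) (-1)).foldl
    (fun acc i =>
      let pack := PySem.List.pyGetD iterable i ("", 0)
      if lastIdx.get? pack.1 == some i then acc ++ [pack] else acc) []

-- ===== PRECONDITION & SPEC =====
def Spec_iter_last_unique_py (iterable : List (String × Int)) (out : List (String × Int)) : Prop := out = iter_last_unique_py_alt iterable
instance (iterable : List (String × Int)) (out : List (String × Int)) : Decidable (Spec_iter_last_unique_py iterable out) := by unfold Spec_iter_last_unique_py; infer_instance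

-- ===== CLAIM (what is proved, stated in full; the proofs are below) =====
def Claim_equal_iter_last_unique_py : Prop := ∀ (iterable : List (String × Int)), Dom_iter_last_unique_py iterable → Spec_iter_last_unique_py iterable (iter_last_unique_py iterable)

-- ===== LEMMAS AND PROOFS =====

/-- A's loop body as a recursion: keep each element whose key was not yet seen. -/
def keepA : List (String × Int) → PySem.Set String → List (String × Int)
  | [], _ => []
  | p :: r, s => if s.contains p.1 then keepA r s else p :: keepA r (PySem.Set.add s p.1)

/-- Common specification: the elements whose key does not occur again later, in order. -/
def lastG : List (String × Int) → List (String × Int)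
  | [] => []
  | p :: r => if p.1 ∈ r.map (·.1) then lastG r else p :: lastG r

theorem foldA_eq_keepA (l : List (String × Int)) (out : List (String × Int)) (s : PySem.Set String) :
    (l.foldl
      (fun (st : List (String × Int) × PySem.Set String) pack =>
        if st.2.contains pack.1 then st
        else (st.1 ++ [pack], PySem.Set.add st.2 pack.1)) (out, s)).1 = out ++ keepA l s := by
  induction l generalizing out s with
  | nil => simp [keepA]
  | cons p r ih =>
    rw [List.foldl_cons]
    cases hc : PySem.Set.contains s p.1
    · simp only [keepA, hc, Bool.false_eq_true, if_false]
      rw [ih]; simp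
    · simp only [keepA, hc, if_true]
      exact ih out s

theorem keepA_append (l : List (String × Int)) (p : String × Int) (s : PySem.Set String) :
    keepA (l ++ [p]) s =
      keepA l s ++ (if p.1 ∈ s ∨ p.1 ∈ l.map (·.1) then [] else [p]) := by
  induction l generalizing s with
  | nil => by_cases h : p.1 ∈ s <;> simp [keepA, h]
  | cons q r ih =>
    by_cases hq : q.1 ∈ s
    · simp [keepA, hq, ih]
      split_ifs <;> simp_all
    · simp [keepA, hq, ih]
      split_ifs <;> simp_all

theorem keepA_reverse_eq (xs : List (String × Int)) :
    keepA xs.reverse PySem.Set.empty = (lastG xs).reverse := by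
  induction xs with
  | nil => simp [keepA, lastG]
  | cons p r ih =>
    rw [List.reverse_cons, keepA_append, ih, lastG]
    by_cases h : p.1 ∈ r.map (·.1)
    · simp [h, PySem.Set.empty]
    · simp [h, PySem.Set.empty]

theorem lastG_append (l : List (String × Int)) (p : String × Int) :
    lastG (l ++ [p]) = (lastG l).filter (fun q => !(q.1 == p.1)) ++ [p] := by
  induction l with
  | nil => simp [lastG]
  | cons q r ih =>
    simp only [List.cons_append, lastG, List.map_append, ih]
    by_cases h2 : q.1 = p.1
    · split_ifs <;> simp_all
    · by_cases h1 : q.1 ∈ r.map (·.1) <;> simp [h1, h2]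

/-- B's last-index table. -/
def bdict (xs : List (String × Int)) : PySem.Dict String Int :=
  (PySem.List.enumerate xs 0).foldl (fun d p => d.insert p.2.1 p.1) PySem.Dict.empty

/-- B's reverse loop, read forwards: indices kept by the last-index test, as a filter-map. -/
def FB (xs : List (String × Int)) (d : PySem.Dict String Int) : List (String × Int) :=
  ((List.range xs.length).filter
      (fun j => d.get? (xs.getD j ("", 0)).1 == some (j : Int))).map
    (fun j => xs.getD j ("", 0))

theorem bdict_append (xs : List (String × Int)) (p : String × Int) :
    bdict (xs ++ [p]) = (bdict xs).insert p.1 (xs.length : Int) := by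
  unfold bdict
  rw [PySem.List.enumerate_append, List.foldl_append]
  simp [PySem.List.enumerate]

theorem FB_append (xs : List (String × Int)) (p : String × Int) :
    FB (xs ++ [p]) (bdict (xs ++ [p])) =
      (FB xs (bdict xs)).filter (fun q => !(q.1 == p.1)) ++ [p] := by
  rw [bdict_append]
  unfold FB
  rw [List.length_append, List.length_singleton, List.range_succ, List.filter_append,
    List.map_append, List.filter_map, List.filter_filter]
  simp only [Function.comp]
  congr 1
  · rw [show (List.range xs.length).filter
        (fun j => (((bdict xs).insert p.1 (xs.length : Int)).get?
            ((xs ++ [p]).getD j ("", 0)).1 == some (j : Int)))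
        = (List.range xs.length).filter
        (fun a => (!(xs.getD a ("", 0)).1 == p.1) &&
            ((bdict xs).get? (xs.getD a ("", 0)).1 == some (a : Int))) from
      List.filter_congr ?_]
    · apply List.map_congr_left
      intro j hj
      simp only [List.mem_filter, List.mem_range] at hj
      rw [List.getD_append _ _ _ _ hj.1]
    · intro j hj
      simp only [List.mem_range] at hj
      rw [List.getD_append _ _ _ _ hj, PySem.Dict.get?_insert]
      simp only [List.getD]
      by_cases hk : (xs[j]?.getD ("", 0)).1 = p.1
      · simp [hk]
        omega
      · simp [hk]
  · simp [PySem.Dict.get?_insert_self]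

theorem FB_eq_lastG (xs : List (String × Int)) : FB xs (bdict xs) = lastG xs := by
  induction xs using List.reverseRecOn with
  | nil => simp [FB, lastG]
  | append_singleton xs p ih => rw [FB_append, ih, lastG_append]

theorem B_eq (xs : List (String × Int)) :
    iter_last_unique_py_alt xs = (lastG xs).reverse := by
  rw [← FB_eq_lastG]
  show (PySem.List.pyRange ((xs.length : Int) - 1) (-1) (-1)).foldl
    (fun acc i =>
      if (bdict xs).get? (PySem.List.pyGetD xs i ("", 0)).1 == some i then
        acc ++ [PySem.List.pyGetD xs i ("", 0)] else acc) [] = (FB xs (bdict xs)).reverse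
  rw [show PySem.List.pyRange ((xs.length : Int) - 1) (-1) (-1)
      = (PySem.List.pyRange 0 (xs.length : Int) 1).reverse from by
    rw [PySem.List.pyRange_neg_one_eq_reverse]; norm_num]
  rw [PySem.List.foldl_append_if]
  rw [List.filter_reverse, List.map_reverse]
  rw [List.nil_append]
  congr 1
  unfold FB
  rw [PySem.List.pyRange_zero_natCast]
  rw [List.filter_map, List.map_map]
  simp [Function.comp_def]

-- ===== VERDICT (by name: the statement is the Claim_ definition above) =====
theorem iter_last_unique_py_spec : Claim_equal_iter_last_unique_py := by
  intro xs _
  show iter_last_unique_py xs = iter_last_unique_py_alt xs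
  rw [iter_last_unique_py, foldA_eq_keepA, B_eq, keepA_reverse_eq, List.nil_append]
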